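-- pv_equiv track=rewrite | github.com/ComposioHQ/composio | fern/generators/python-sdk/autodoc_core/convert_rst_to_mdx.py | split_pt_tf_code_blocks
-- ===== SOURCE A (Python) =====
-- def split_pt_tf_code_blocks(text):
--     """
--     Split PyTorch and TensorFlow specific block codes.
--     """
--     lines = text.split("\n")
--     new_lines = []
--     idx = 0
--     while idx < len(lines):
--         if lines[idx].startswith("```"):
--             code_lines = {"common": [lines[idx]], "pytorch": [], "tensorflow": []}
--             is_pytorch = False
--             is_tensorflow = False
--             idx += 1
--             while idx < len(lines) and lines[idx].strip() != "```":
--                 if "## PYTORCH CODE" in lines[idx]: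
--                     is_pytorch = True
--                     is_tensorflow = False
--                 elif "## TENSORFLOW CODE" in lines[idx]:
--                     is_tensorflow = True
--                     is_pytorch = False
--                 elif is_pytorch:
--                     code_lines["pytorch"].append(lines[idx])
--                 elif is_tensorflow:
--                     code_lines["tensorflow"].append(lines[idx])
--                 else:
--                     code_lines["common"].append(lines[idx])
--                 idx += 1
--             if len(code_lines["pytorch"]) > 0 or len(code_lines["tensorflow"]) > 0:
--                 block_lines = ["<frameworkcontent>", "<pt>"]
--                 block_lines.extend(code_lines["common"].copy() + code_lines["pytorch"])
--                 block_lines.extend(["```", "</pt>", "<tf>"])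
--                 block_lines.extend(code_lines["common"].copy() + code_lines["tensorflow"])
--                 block_lines.extend(["```", "</tf>", "</frameworkcontent>"])
--                 new_lines.extend(block_lines)
--             else:
--                 block_lines = code_lines["common"] + ["```"]
--                 new_lines.extend(block_lines)
--             idx += 1
--         else:
--             new_lines.append(lines[idx])
--             idx += 1
--     return "\n".join(new_lines)
-- ===== SOURCE B (Python) =====
-- def _cut(lines, hit):
--     """Split at the first line satisfying hit: (before, that line or None, after)."""
--     j = next((k for k, ln in enumerate(lines) if hit(ln)), None)
--     return (lines, None, []) if j is None else (lines[:j], lines[j], lines[j + 1:])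
--
--
-- def _is_marker(ln):
--     return "## PYTORCH CODE" in ln or "## TENSORFLOW CODE" in ln
--
--
-- def _render(fence, body):
--     """Render one fenced block: chunk the interior at marker lines."""
--     common, mark, rest = _cut(body, _is_marker)
--     pt, tf = [], []
--     while mark is not None:
--         chunk, nxt, rest = _cut(rest, _is_marker)
--         if "## PYTORCH CODE" in mark:
--             pt += chunk
--         else:
--             tf += chunk
--         mark = nxt
--     head = [fence] + common
--     if pt or tf:
--         return (["<frameworkcontent>", "<pt>"] + head + pt
--                 + ["```", "</pt>", "<tf>"] + head + tf
--                 + ["```", "</tf>", "</frameworkcontent>"])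
--     return head + ["```"]
--
--
-- def split_pt_tf_code_blocks(text):
--     """
--     Split PyTorch and TensorFlow specific block codes.
--     """
--     out, lines = [], text.split("\n")
--     while True:
--         plain, fence, lines = _cut(lines, lambda ln: ln.startswith("```"))
--         out += plain
--         if fence is None:
--             return "\n".join(out)
--         body, _, lines = _cut(lines, lambda ln: ln.strip() == "```")
--         out += _render(fence, body)
-- ===== Notes on version B (the rewrite author's own statement) =====
-- stated objective: alternative
-- what changed: A walks the text line by line with a mutable index and two boolean section flags, appending each line to one of three buckets; B never tracks per-line state: a single generic find-first-and-slice helper cuts the line list at the next fence/marker, the outer loop consumes whole plain/block chunks, and a block's interior is consumed marker-segment by marker-segment, assigning each whole slice to the pt or tf bucket by the marker line that opened it.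
import Mathlib
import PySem

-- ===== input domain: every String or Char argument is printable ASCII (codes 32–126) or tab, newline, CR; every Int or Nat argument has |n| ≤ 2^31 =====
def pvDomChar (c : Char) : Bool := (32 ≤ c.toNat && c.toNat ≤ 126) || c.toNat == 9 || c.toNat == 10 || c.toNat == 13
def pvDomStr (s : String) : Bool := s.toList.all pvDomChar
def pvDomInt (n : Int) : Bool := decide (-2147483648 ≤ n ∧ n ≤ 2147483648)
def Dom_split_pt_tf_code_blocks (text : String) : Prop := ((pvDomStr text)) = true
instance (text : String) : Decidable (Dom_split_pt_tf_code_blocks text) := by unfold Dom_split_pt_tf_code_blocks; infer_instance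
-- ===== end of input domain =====

-- B replaces A's line-by-line state machine (index + two section flags) by chunk-wise
-- cutting: a generic split-at-first-match helper segments the lines at fences and markers,
-- and whole slices are assigned to buckets (objective: alternative decomposition, same cost).

-- ===== PORT A =====
-- inner while-loop of A: consumes lines until a closing fence, carrying the two flags and the
-- three buckets (tail-append, as Python's list.append); returns (common, pytorch, tensorflow, lines after the fence)
def pvAInner : List String → Bool → Bool → List String → List String → List String →
    (List String × List String × List String × List String)
  | [], _, _, c, p, t => (c, p, t, [])
  | l :: rest, pt, tf, c, p, t =>
    if PySem.Str.strip l == "```" then (c, p, t, rest)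
    else if PySem.Str.isIn "## PYTORCH CODE" l then pvAInner rest true false c p t
    else if PySem.Str.isIn "## TENSORFLOW CODE" l then pvAInner rest false true c p t
    else if pt then pvAInner rest pt tf c (p ++ [l]) t
    else if tf then pvAInner rest pt tf c p (t ++ [l])
    else pvAInner rest pt tf (c ++ [l]) p t

-- needed by pvAOuter's termination proof
theorem pvAInner_rest_le (ls : List String) : ∀ pt tf c p t,
    (pvAInner ls pt tf c p t).2.2.2.length ≤ ls.length := by
  induction ls with
  | nil => intro pt tf c p t; simp [pvAInner]
  | cons l rest ih =>
    intro pt tf c p t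
    simp only [pvAInner]
    split_ifs <;> simp <;> exact Nat.le_succ_of_le (ih _ _ _ _ _)

-- outer while-loop of A
def pvAOuter : List String → List String
  | [] => []
  | l :: rest =>
    if PySem.Str.startswith l "```" then
      let r := pvAInner rest false false [l] [] []
      (if r.2.1.length > 0 || r.2.2.1.length > 0 then
        ["<frameworkcontent>", "<pt>"] ++ (r.1 ++ r.2.1) ++ ["```", "</pt>", "<tf>"] ++
          (r.1 ++ r.2.2.1) ++ ["```", "</tf>", "</frameworkcontent>"]
      else r.1 ++ ["```"]) ++ pvAOuter r.2.2.2
    else l :: pvAOuter rest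
termination_by ls => ls.length
decreasing_by
  · simp only [List.length_cons]
    exact Nat.lt_succ_of_le (pvAInner_rest_le rest false false [l] [] [])
  · simp

def split_pt_tf_code_blocks (text : String) : String :=
  -- the separator "\n" is nonempty, so split? is always some
  PySem.Str.join "\n" (pvAOuter ((PySem.Str.split? text "\n").getD []))

-- ===== PORT B =====
-- Source B's _cut: split a line list at the first line satisfying hit: (before, hit line or none, after)
def pvCut (hit : String → Bool) : List String → List String × Option String × List String
  | [] => ([], none, [])
  | l :: rest =>
    if hit l then ([], some l, rest)
    else
      let r := pvCut hit rest
      (l :: r.1, r.2.1, r.2.2)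

-- needed by the termination proofs of pvTaggedLoop and pvBOuter
theorem pvCut_rest_le (hit : String → Bool) (ls : List String) :
    (pvCut hit ls).2.2.length ≤ ls.length := by
  induction ls with
  | nil => simp [pvCut]
  | cons l rest ih =>
    simp only [pvCut]
    split_ifs <;> simp <;> exact Nat.le_succ_of_le ih

theorem pvCut_rest_lt (hit : String → Bool) (ls : List String) (m : String)
    (h : (pvCut hit ls).2.1 = some m) : (pvCut hit ls).2.2.length < ls.length := by
  induction ls with
  | nil => simp [pvCut] at h
  | cons l rest ih =>
    simp only [pvCut] at h ⊢
    split_ifs at h ⊢ <;> simp_all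
    exact pvCut_rest_le hit rest

-- Source B's _is_marker
def pvIsMarker (ln : String) : Bool :=
  PySem.Str.isIn "## PYTORCH CODE" ln || PySem.Str.isIn "## TENSORFLOW CODE" ln

-- the while-loop of _render: consume the interior marker-segment by marker-segment,
-- assigning each whole chunk to pt or tf by the marker line that opened it
def pvTaggedLoop : Option String → List String → List String → List String →
    List String × List String
  | none, _, pt, tf => (pt, tf)
  | some mark, rest, pt, tf =>
    let r := pvCut pvIsMarker rest
    if PySem.Str.isIn "## PYTORCH CODE" mark then pvTaggedLoop r.2.1 r.2.2 (pt ++ r.1) tf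
    else pvTaggedLoop r.2.1 r.2.2 pt (tf ++ r.1)
termination_by mk rest _ _ => rest.length + (match mk with | some _ => 1 | none => 0)
decreasing_by
  · rcases h : (pvCut pvIsMarker rest).2.1 with _ | m2 <;> simp
    · exact pvCut_rest_le pvIsMarker rest
    · exact pvCut_rest_lt pvIsMarker rest m2 h
  · rcases h : (pvCut pvIsMarker rest).2.1 with _ | m2 <;> simp
    · exact pvCut_rest_le pvIsMarker rest
    · exact pvCut_rest_lt pvIsMarker rest m2 h

-- Source B's _render
def pvRender (fence : String) (body : List String) : List String :=
  let c := pvCut pvIsMarker body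
  let r := pvTaggedLoop c.2.1 c.2.2 [] []
  let head := fence :: c.1
  if !r.1.isEmpty || !r.2.isEmpty then
    ["<frameworkcontent>", "<pt>"] ++ head ++ r.1 ++ ["```", "</pt>", "<tf>"] ++
      head ++ r.2 ++ ["```", "</tf>", "</frameworkcontent>"]
  else head ++ ["```"]

-- Source B's outer while-loop: cut off the plain prefix, then a block, and continue
def pvBOuter (lines : List String) : List String :=
  let a := pvCut (fun ln => PySem.Str.startswith ln "```") lines
  if h : a.2.1.isSome then
    let b := pvCut (fun ln => PySem.Str.strip ln == "```") a.2.2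
    a.1 ++ pvRender (a.2.1.get h) b.1 ++ pvBOuter b.2.2
  else a.1
termination_by lines.length
decreasing_by
  obtain ⟨m, hm⟩ := Option.isSome_iff_exists.mp h
  exact Nat.lt_of_le_of_lt
    (pvCut_rest_le (fun ln => PySem.Str.strip ln == "```") _)
    (pvCut_rest_lt (fun ln => PySem.Str.startswith ln "```") lines m hm)

def split_pt_tf_code_blocks_alt (text : String) : String :=
  -- the separator "\n" is nonempty, so split? is always some
  PySem.Str.join "\n" (pvBOuter ((PySem.Str.split? text "\n").getD []))

-- ===== PRECONDITION & SPEC =====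
def Spec_split_pt_tf_code_blocks (text : String) (out : String) : Prop := out = split_pt_tf_code_blocks_alt text
instance (text : String) (out : String) : Decidable (Spec_split_pt_tf_code_blocks text out) := by unfold Spec_split_pt_tf_code_blocks; infer_instance

-- ===== CLAIM (what is proved, stated in full; the proofs are below) =====
def Claim_equal_split_pt_tf_code_blocks : Prop := ∀ (text : String), Dom_split_pt_tf_code_blocks text → Spec_split_pt_tf_code_blocks text (split_pt_tf_code_blocks text)

-- ===== LEMMAS AND PROOFS =====
-- tagged phase: A's inner loop with flags (b, !b) for "after a marker line m with b = PT∈m"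
-- equals B's cut-at-close followed by the chunk loop started at marker m
theorem pvInner_tagged (ls : List String) : ∀ (m : String) (c p t : List String),
    pvAInner ls (PySem.Str.isIn "## PYTORCH CODE" m) (!(PySem.Str.isIn "## PYTORCH CODE" m)) c p t
    = (c,
       (pvTaggedLoop (some m) (pvCut (fun ln => PySem.Str.strip ln == "```") ls).1 p t).1,
       (pvTaggedLoop (some m) (pvCut (fun ln => PySem.Str.strip ln == "```") ls).1 p t).2,
       (pvCut (fun ln => PySem.Str.strip ln == "```") ls).2.2) := by
  induction ls with
  | nil =>
    intro m c p t
    simp only [pvAInner, pvCut, pvTaggedLoop]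
    split_ifs <;> simp [pvTaggedLoop]
  | cons x rest ih =>
    intro m c p t
    by_cases h1 : (PySem.Str.strip x == "```") = true
    · simp only [pvAInner, pvCut, pvTaggedLoop, h1, if_true]
      split_ifs <;> simp [pvTaggedLoop]
    · by_cases h2 : PySem.Str.isIn "## PYTORCH CODE" x = true
      · have hMark : pvIsMarker x = true := by unfold pvIsMarker; rw [h2]; rfl
        have hih := ih x c p t
        rw [h2] at hih
        simp only [Bool.not_true] at hih
        simp only [pvAInner, pvCut, pvTaggedLoop, h1, h2, hMark, if_true, Bool.false_eq_true,
          if_false, hih]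
        split_ifs <;> simp
      · simp only [Bool.not_eq_true] at h2
        by_cases h3 : PySem.Str.isIn "## TENSORFLOW CODE" x = true
        · have hMark : pvIsMarker x = true := by unfold pvIsMarker; rw [h2, h3]; rfl
          have hih := ih x c p t
          rw [h2] at hih
          simp only [Bool.not_false] at hih
          simp only [pvAInner, pvCut, pvTaggedLoop, h1, h2, h3, hMark, if_true,
            Bool.false_eq_true, if_false, hih]
          split_ifs <;> simp
        · simp only [Bool.not_eq_true] at h3
          have hMark : pvIsMarker x = false := by unfold pvIsMarker; rw [h2, h3]; rfl
          simp only [pvAInner, pvCut, pvTaggedLoop, h1, h2, h3, hMark, Bool.false_eq_true,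
            if_false]
          by_cases hb : PySem.Str.isIn "## PYTORCH CODE" m = true
          · simp only [hb, Bool.not_true, if_true, Bool.false_eq_true, if_false]
            have hih := ih m c (p ++ [x]) t
            rw [hb] at hih
            simp only [Bool.not_true] at hih
            rw [hih]
            simp at hb
            simp [pvTaggedLoop, hb]
          · simp only [Bool.not_eq_true] at hb
            simp only [hb, Bool.not_false, if_true, Bool.false_eq_true, if_false]
            have hih := ih m c p (t ++ [x])
            rw [hb] at hih
            simp only [Bool.not_false] at hih
            rw [hih]
            simp at hb
            simp [pvTaggedLoop, hb]

-- common phase: A's inner loop from the start of a block equals cut-at-close, cut-at-first-marker,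
-- then the chunk loop
theorem pvInner_common (ls : List String) : ∀ (c p t : List String),
    pvAInner ls false false c p t
    = (c ++ (pvCut pvIsMarker (pvCut (fun ln => PySem.Str.strip ln == "```") ls).1).1,
       (pvTaggedLoop (pvCut pvIsMarker (pvCut (fun ln => PySem.Str.strip ln == "```") ls).1).2.1
         (pvCut pvIsMarker (pvCut (fun ln => PySem.Str.strip ln == "```") ls).1).2.2 p t).1,
       (pvTaggedLoop (pvCut pvIsMarker (pvCut (fun ln => PySem.Str.strip ln == "```") ls).1).2.1
         (pvCut pvIsMarker (pvCut (fun ln => PySem.Str.strip ln == "```") ls).1).2.2 p t).2,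
       (pvCut (fun ln => PySem.Str.strip ln == "```") ls).2.2) := by
  induction ls with
  | nil =>
    intro c p t
    simp [pvAInner, pvCut, pvTaggedLoop]
  | cons x rest ih =>
    intro c p t
    by_cases h1 : (PySem.Str.strip x == "```") = true
    · simp [pvAInner, pvCut, pvTaggedLoop, h1]
    · by_cases h2 : PySem.Str.isIn "## PYTORCH CODE" x = true
      · have hMark : pvIsMarker x = true := by unfold pvIsMarker; rw [h2]; rfl
        have hT := pvInner_tagged rest x c p t
        rw [h2] at hT
        simp only [Bool.not_true] at hT
        simp only [pvAInner, pvCut, h1, h2, hMark, if_true, Bool.false_eq_true, if_false, hT]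
        simp [pvCut, hMark]
      · simp only [Bool.not_eq_true] at h2
        by_cases h3 : PySem.Str.isIn "## TENSORFLOW CODE" x = true
        · have hMark : pvIsMarker x = true := by unfold pvIsMarker; rw [h2, h3]; rfl
          have hT := pvInner_tagged rest x c p t
          rw [h2] at hT
          simp only [Bool.not_false] at hT
          simp only [pvAInner, pvCut, h1, h2, h3, hMark, if_true, Bool.false_eq_true, if_false, hT]
          simp [pvCut, hMark]
        · simp only [Bool.not_eq_true] at h3
          have hMark : pvIsMarker x = false := by unfold pvIsMarker; rw [h2, h3]; rfl
          simp only [pvAInner, pvCut, h1, h2, h3, hMark, Bool.false_eq_true, if_false]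
          rw [ih (c ++ [x]) p t]
          simp [pvCut, hMark]

theorem pvBOuter_cons_plain (l : String) (rest : List String)
    (h : PySem.Str.startswith l "```" = false) :
    pvBOuter (l :: rest) = l :: pvBOuter rest := by
  have hA : pvCut (fun ln => PySem.Str.startswith ln "```") (l :: rest)
      = (l :: (pvCut (fun ln => PySem.Str.startswith ln "```") rest).1,
         (pvCut (fun ln => PySem.Str.startswith ln "```") rest).2.1,
         (pvCut (fun ln => PySem.Str.startswith ln "```") rest).2.2) := by
    simp only [pvCut, h, Bool.false_eq_true, if_false]
  rw [pvBOuter]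
  conv_rhs => rw [pvBOuter]
  simp only [hA]
  by_cases hs : (pvCut (fun ln => PySem.Str.startswith ln "```") rest).2.1.isSome = true
  · rw [dif_pos hs, dif_pos hs]
    simp
  · rw [dif_neg hs, dif_neg hs]

theorem pvBOuter_cons_open (l : String) (rest : List String)
    (h : PySem.Str.startswith l "```" = true) :
    pvBOuter (l :: rest) =
      pvRender l (pvCut (fun ln => PySem.Str.strip ln == "```") rest).1 ++
        pvBOuter (pvCut (fun ln => PySem.Str.strip ln == "```") rest).2.2 := by
  have hA : pvCut (fun ln => PySem.Str.startswith ln "```") (l :: rest)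
      = ([], some l, rest) := by
    simp only [pvCut, h, if_true]
  rw [pvBOuter]
  simp only [hA]
  simp

theorem pvOuter_eq_aux : ∀ (n : Nat) (ls : List String), ls.length ≤ n →
    pvAOuter ls = pvBOuter ls := by
  intro n
  induction n with
  | zero =>
    intro ls h
    have hnil : ls = [] := List.eq_nil_of_length_eq_zero (Nat.le_zero.mp h)
    subst hnil
    rw [pvAOuter, pvBOuter]
    simp [pvCut]
  | succ n ih =>
    intro ls h
    match ls with
    | [] =>
      rw [pvAOuter, pvBOuter]
      simp [pvCut]
    | l :: rest =>
      by_cases hs : PySem.Str.startswith l "```" = true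
      · rw [pvAOuter]
        simp only [hs, if_true]
        rw [pvBOuter_cons_open l rest hs]
        rw [pvInner_common rest [l] [] []]
        rw [ih _ (le_trans (pvCut_rest_le _ rest) (Nat.le_of_succ_le_succ (by simpa using h)))]
        congr 1
        simp only [pvRender]
        by_cases hP : (pvTaggedLoop (pvCut pvIsMarker (pvCut (fun ln => PySem.Str.strip ln == "```") rest).1).2.1
            (pvCut pvIsMarker (pvCut (fun ln => PySem.Str.strip ln == "```") rest).1).2.2 [] []).1 = [] <;>
          by_cases hT : (pvTaggedLoop (pvCut pvIsMarker (pvCut (fun ln => PySem.Str.strip ln == "```") rest).1).2.1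
            (pvCut pvIsMarker (pvCut (fun ln => PySem.Str.strip ln == "```") rest).1).2.2 [] []).2 = [] <;>
          simp [hP, hT]
      · simp only [Bool.not_eq_true] at hs
        rw [pvAOuter]
        simp only [hs, Bool.false_eq_true, if_false]
        rw [pvBOuter_cons_plain l rest hs]
        rw [ih rest (Nat.le_of_succ_le_succ (by simpa using h))]

theorem pvOuter_eq (ls : List String) : pvAOuter ls = pvBOuter ls :=
  pvOuter_eq_aux ls.length ls le_rfl

-- ===== VERDICT (by name: the statement is the Claim_ definition above) =====
theorem split_pt_tf_code_blocks_spec : Claim_equal_split_pt_tf_code_blocks := by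
  intro text _
  unfold Spec_split_pt_tf_code_blocks split_pt_tf_code_blocks split_pt_tf_code_blocks_alt
  rw [pvOuter_eq]
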